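-- pv_equiv track=rewrite | github.com/jmk1067/SalemTileStitcher | SalemTileSticher.py | ListDividerThree
-- ===== SOURCE A (Python) =====
-- def ListDividerThree(List): # Divides lists into 3 parts.
--     List.sort()
--     ListA = []
--     ListB = []
--     ListC = []
--     for Number in List:
--         if Number < 250:
--             ListA.append(Number)
--         elif 250 < Number < 500:
--             ListB.append(Number)
--         else:
--             ListC.append(Number)
--     return(ListA, ListB, ListC)
-- ===== SOURCE B (Python) =====
-- def ListDividerThree(List):  # Divides lists into 3 parts.
--     # Sort in place, then cut the sorted list at the two range boundaries.
--     List.sort()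
--     i = sum(v < 250 for v in List)
--     j = sum(v < 500 for v in List)
--     return (List[:i], List[i:j], List[j:])
-- ===== Notes on version B (the rewrite author's own statement) =====
-- stated objective: simpler
-- what changed: Replaces the branch-and-append scan with computing the two boundary positions (counts of values <250 and <500) and returning three contiguous slices of the sorted list.
-- intended difference: On lists containing the value 250, A's strict comparisons (250 < Number < 500) drop 250 into the last bucket ListC; B puts 250 in the middle bucket, which is the intended [250,500) range of a three-way partition. — e.g. on ListDividerThree([250]): A returns ([], [], [250]), B returns ([], [250], [])
import Mathlib
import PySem

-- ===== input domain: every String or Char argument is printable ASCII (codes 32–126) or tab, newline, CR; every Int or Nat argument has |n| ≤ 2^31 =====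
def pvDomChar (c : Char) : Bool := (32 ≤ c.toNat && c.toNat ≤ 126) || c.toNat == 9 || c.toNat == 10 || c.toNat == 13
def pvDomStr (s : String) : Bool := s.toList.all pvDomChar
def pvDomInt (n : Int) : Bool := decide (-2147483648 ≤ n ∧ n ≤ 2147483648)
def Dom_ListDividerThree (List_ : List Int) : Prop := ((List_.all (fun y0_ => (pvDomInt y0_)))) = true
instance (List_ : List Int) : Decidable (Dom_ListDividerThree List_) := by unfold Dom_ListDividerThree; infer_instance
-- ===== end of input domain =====

-- B sorts, then counts the two boundary positions and returns three contiguous slices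
-- (simpler decomposition, same cost); B intentionally puts 250 in the middle bucket (D_ below).
-- Python A sorts its argument in place; so does Python B; the equivalence proved here is
-- about the RETURN value.

-- ===== PORT A =====
def ListDividerThree (List_ : List Int) : List Int × List Int × List Int :=
  let s := PySem.List.sorted List_ (fun x => x) false
  s.foldl (fun acc n =>
    if n < 250 then (acc.1 ++ [n], acc.2.1, acc.2.2)
    else if 250 < n ∧ n < 500 then (acc.1, acc.2.1 ++ [n], acc.2.2)
    else (acc.1, acc.2.1, acc.2.2 ++ [n])) ([], [], [])

-- ===== PORT B =====
def ListDividerThree_alt (List_ : List Int) : List Int × List Int × List Int :=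
  let s := PySem.List.sorted List_ (fun x => x) false
  let i : Int := s.foldl (fun acc v => acc + (if v < 250 then 1 else 0)) 0
  let j : Int := s.foldl (fun acc v => acc + (if v < 500 then 1 else 0)) 0
  (PySem.List.slice s none (some i),
   PySem.List.slice s (some i) (some j),
   PySem.List.slice s (some j) none)

-- ===== PRECONDITION & SPEC =====
-- On lists containing the value 250, A's strict comparisons (250 < Number < 500) drop 250 into
-- the last bucket ListC; B puts 250 in the middle bucket, which is the intended [250,500) range.
def D_ListDividerThree (List_ : List Int) : Prop := (250 : Int) ∈ List_
instance (List_ : List Int) : Decidable (D_ListDividerThree List_) := by unfold D_ListDividerThree; infer_instance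

def Spec_ListDividerThree (List_ : List Int) (out : List Int × List Int × List Int) : Prop := ¬ D_ListDividerThree List_ → out = ListDividerThree_alt List_
instance (List_ : List Int) (out : List Int × List Int × List Int) : Decidable (Spec_ListDividerThree List_ out) := by unfold Spec_ListDividerThree; infer_instance

def pvDiffWitness_ListDividerThree : List Int := [250]
def pvDiffWitnessOut_ListDividerThree : (List Int × List Int × List Int) × (List Int × List Int × List Int) :=
  (([], [], [250]), ([], [250], []))

-- ===== CLAIM (what is proved, stated in full; the proofs are below) =====
def Claim_unchanged_ListDividerThree : Prop := ∀ (List_ : List Int), Dom_ListDividerThree List_ → Spec_ListDividerThree List_ (ListDividerThree List_)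
def Claim_changed_ListDividerThree : Prop := Dom_ListDividerThree (pvDiffWitness_ListDividerThree) ∧ D_ListDividerThree (pvDiffWitness_ListDividerThree) ∧ ListDividerThree (pvDiffWitness_ListDividerThree) = pvDiffWitnessOut_ListDividerThree.1 ∧ ListDividerThree_alt (pvDiffWitness_ListDividerThree) = pvDiffWitnessOut_ListDividerThree.2 ∧ pvDiffWitnessOut_ListDividerThree.1 ≠ pvDiffWitnessOut_ListDividerThree.2
def Claim_exact_ListDividerThree : Prop := ∀ (List_ : List Int), Dom_ListDividerThree List_ → D_ListDividerThree List_ → ListDividerThree List_ ≠ ListDividerThree_alt List_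

-- ===== LEMMAS AND PROOFS =====

-- A's loop, on any list, appends the three filters to the accumulators.
theorem foldA (l : List Int) (a b c : List Int) :
    l.foldl (fun acc n =>
      if n < 250 then (acc.1 ++ [n], acc.2.1, acc.2.2)
      else if 250 < n ∧ n < 500 then (acc.1, acc.2.1 ++ [n], acc.2.2)
      else (acc.1, acc.2.1, acc.2.2 ++ [n])) (a, b, c)
    = (a ++ l.filter (fun n => decide (n < 250)),
       b ++ l.filter (fun n => decide (250 < n ∧ n < 500)),
       c ++ l.filter (fun n => !decide (n < 250) && !decide (250 < n ∧ n < 500))) := by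
  induction l generalizing a b c with
  | nil => simp
  | cons x t ih =>
    by_cases h1 : x < 250
    · have h2 : ¬(250 < x ∧ x < 500) := by omega
      simp [h1, h2, ih]
    · by_cases h2 : 250 < x ∧ x < 500
      · simp [h1, h2, ih]
      · simp [h1, h2, ih, List.filter_cons]

-- On a sorted list, taking countP p elements yields filter p, for p closed downward.
theorem take_countP (p : Int → Bool) (mono : ∀ x y : Int, x ≤ y → p y = true → p x = true) :
    ∀ l : List Int, l.Pairwise (· ≤ ·) → l.take (l.countP p) = l.filter p := by
  intro l hl
  induction l with
  | nil => simp
  | cons x t ih =>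
    rcases List.pairwise_cons.mp hl with ⟨hx, ht⟩
    by_cases h : p x = true
    · simp [h, ih ht]
    · have hnone : ∀ y ∈ t, ¬ p y = true := fun y hy hpy => h (mono x y (hx y hy) hpy)
      have h0 : t.countP p = 0 := List.countP_eq_zero.mpr hnone
      simp [h, h0, List.filter_eq_nil_iff.mpr hnone]

-- Dropping countP p elements of a sorted list yields filter (¬ p).
theorem drop_countP (p : Int → Bool) (mono : ∀ x y : Int, x ≤ y → p y = true → p x = true) :
    ∀ l : List Int, l.Pairwise (· ≤ ·) → l.drop (l.countP p) = l.filter (fun x => !p x) := by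
  intro l hl
  induction l with
  | nil => simp
  | cons x t ih =>
    rcases List.pairwise_cons.mp hl with ⟨hx, ht⟩
    by_cases h : p x = true
    · simp [h, ih ht]
    · have hnone : ∀ y ∈ t, ¬ p y = true := fun y hy hpy => h (mono x y (hx y hy) hpy)
      have h0 : t.countP p = 0 := List.countP_eq_zero.mpr hnone
      have hall : t.filter (fun x => !p x) = t :=
        List.filter_eq_self.mpr (fun y hy => by simp [hnone y hy])
      simp [h, h0, hall]

-- In a sorted list, a filter by (u ∨ v) splits into filter u ++ filter v when a
-- v-element can never precede a u-element.
theorem filter_or_split (u v : Int → Bool)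
    (sep : ∀ x y : Int, x ≤ y → v x = true → u y = true → False) :
    ∀ l : List Int, l.Pairwise (· ≤ ·) →
      l.filter (fun x => u x || v x) = l.filter u ++ l.filter v := by
  intro l hl
  induction l with
  | nil => simp
  | cons x t ih =>
    rcases List.pairwise_cons.mp hl with ⟨hx, ht⟩
    by_cases hu : u x = true
    · have hvx : ¬ v x = true := fun hvv => sep x x le_rfl hvv hu
      simp [hu, hvx, ih ht]
    · by_cases hv : v x = true
      · have hnone : ∀ y ∈ t, ¬ u y = true := fun y hy hpy => sep x y (hx y hy) hv hpy
        have hue : t.filter u = [] := List.filter_eq_nil_iff.mpr hnone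
        have hcong : t.filter (fun x => u x || v x) = t.filter v :=
          List.filter_congr (fun y hy => by simp [hnone y hy])
        simp [hu, hv, hcong, hue]
      · simp [hu, hv, ih ht]

-- B always returns the three filters of the sorted list at the [250,500) boundaries.
theorem altChar (L : List Int) :
    ListDividerThree_alt L =
      ((PySem.List.sorted L (fun x => x) false).filter (fun x => decide (x < 250)),
       (PySem.List.sorted L (fun x => x) false).filter (fun x => decide (250 ≤ x) && decide (x < 500)),
       (PySem.List.sorted L (fun x => x) false).filter (fun x => decide (500 ≤ x))) := by
  unfold ListDividerThree_alt
  set s := PySem.List.sorted L (fun x => x) false with hs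
  have hsorted : s.Pairwise (· ≤ ·) := PySem.List.sorted_pairwise L (fun x => x)
  have e1 : s.foldl (fun acc v => acc + (if v < 250 then 1 else 0)) (0 : Int)
      = (s.countP (fun v => decide (v < 250)) : Int) := by
    rw [PySem.List.foldl_add s (fun v => if v < 250 then (1:Int) else 0) 0]
    have hf : (fun v : Int => if v < 250 then (1:Int) else 0)
        = (fun v : Int => if (fun x : Int => decide (x < 250)) v = true then (1:Int) else 0) := by
      funext v; by_cases h : v < 250 <;> simp [h]
    rw [hf, PySem.List.sum_map_ite_one_zero]
    simp
  have e3 : s.foldl (fun acc v => acc + (if v < 500 then 1 else 0)) (0 : Int)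
      = (s.countP (fun v => decide (v < 500)) : Int) := by
    rw [PySem.List.foldl_add s (fun v => if v < 500 then (1:Int) else 0) 0]
    have hf : (fun v : Int => if v < 500 then (1:Int) else 0)
        = (fun v : Int => if (fun x : Int => decide (x < 500)) v = true then (1:Int) else 0) := by
      funext v; by_cases h : v < 500 <;> simp [h]
    rw [hf, PySem.List.sum_map_ite_one_zero]
    simp
  simp only [e1, e3]
  set c1 := s.countP (fun v => decide (v < 250)) with hc1
  set c3 := s.countP (fun v => decide (v < 500)) with hc3
  rw [PySem.List.slice_to_natCast, PySem.List.slice_natCast, PySem.List.slice_from_natCast]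
  have m1 : ∀ x y : Int, x ≤ y → decide (y < 250) = true → decide (x < 250) = true := by
    intro x y hxy h; simp at h ⊢; omega
  have m3 : ∀ x y : Int, x ≤ y → decide (y < 500) = true → decide (x < 500) = true := by
    intro x y hxy h; simp at h ⊢; omega
  have hdrop1 : s.drop c1 = s.filter (fun x => !decide (x < 250)) := drop_countP _ m1 s hsorted
  have hdrop3 : s.drop c3 = s.filter (fun x => !decide (x < 500)) := drop_countP _ m3 s hsorted
  have hsub1 : (s.filter (fun x => !decide (x < 250))).Pairwise (· ≤ ·) :=
    List.Pairwise.sublist List.filter_sublist hsorted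
  have hsplit3 : s.filter (fun x => decide (x < 500)) =
      s.filter (fun x => decide (x < 250)) ++ s.filter (fun x => !decide (x < 250) && decide (x < 500)) := by
    rw [← filter_or_split _ _ (by intro x y hxy hv hu; simp at hv hu; omega) s hsorted]
    exact List.filter_congr (fun x _ => by by_cases h : x < 250 <;> simp [h] <;> try omega)
  have hcount3 : c3 = c1 + s.countP (fun x => !decide (x < 250) && decide (x < 500)) := by
    rw [hc1, hc3, List.countP_eq_length_filter, List.countP_eq_length_filter,
      List.countP_eq_length_filter, hsplit3, List.length_append]
  refine Prod.ext ?_ (Prod.ext ?_ ?_)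
  · exact take_countP _ m1 s hsorted
  · show (s.drop c1).take (c3 - c1) = _
    rw [hdrop1]
    have hcnt : c3 - c1 = (s.filter (fun x => !decide (x < 250))).countP (fun x => decide (x < 500)) := by
      rw [List.countP_eq_length_filter, List.filter_filter, hcount3,
        ← List.countP_eq_length_filter, Nat.add_sub_cancel_left]
      exact List.countP_congr (fun x _ => by by_cases h : x < 250 <;> simp [h])
    rw [hcnt, take_countP _ m3 _ hsub1, List.filter_filter]
    exact List.filter_congr (fun x _ => by
      by_cases h : x < 250 <;> by_cases h' : x < 500 <;> simp [h, h'] <;> omega)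
  · show s.drop c3 = _
    rw [hdrop3]
    exact List.filter_congr (fun x _ => by by_cases h : x < 500 <;> simp [h] <;> try omega)

theorem ListDividerThree_spec : Claim_unchanged_ListDividerThree := by
  intro L _ hnD
  show ListDividerThree L = ListDividerThree_alt L
  unfold ListDividerThree
  rw [altChar]
  set s := PySem.List.sorted L (fun x => x) false with hs
  have hmem : ∀ x ∈ s, x ≠ (250 : Int) := by
    intro x hx
    have : x ∈ L := (PySem.List.mem_sorted L (fun x => x) false x).mp hx
    intro h; exact hnD (by rwa [h] at this)
  rw [foldA]
  simp only [List.nil_append]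
  refine Prod.ext rfl (Prod.ext ?_ ?_)
  · exact List.filter_congr (fun x hx => by
      have := hmem x hx
      by_cases h : 250 < x ∧ x < 500 <;> simp [h] <;> try omega)
  · exact List.filter_congr (fun x hx => by
      have := hmem x hx
      by_cases h1 : x < 250 <;> by_cases h2 : 250 < x ∧ x < 500 <;> simp [h1, h2] <;> try omega)

theorem ListDividerThree_changed : Claim_changed_ListDividerThree := by
  unfold Claim_changed_ListDividerThree; decide

theorem ListDividerThree_tight : Claim_exact_ListDividerThree := by
  intro L _ hD heq
  have h250s : (250 : Int) ∈ PySem.List.sorted L (fun x => x) false :=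
    (PySem.List.mem_sorted L (fun x => x) false 250).mpr hD
  have hB : (250 : Int) ∈ (ListDividerThree_alt L).2.1 := by
    rw [altChar]
    exact List.mem_filter.mpr ⟨h250s, by decide⟩
  have hA : (250 : Int) ∉ (ListDividerThree L).2.1 := by
    unfold ListDividerThree
    rw [foldA]
    simp only [List.nil_append]
    intro hmem
    have := (List.mem_filter.mp hmem).2
    simp at this
  exact hA (heq ▸ hB)
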